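-- pv_equiv track=rewrite | github.com/LeeHyeonKyu/Coding-Practice | Programmers/2020 KAKAO BLIND RECRUTMENT/괄호 변환.py | solution
-- ===== SOURCE A (Python) =====
-- def algorithm_u(brackets):
--     result = []
--     for idx, bracket in enumerate(brackets):
--         if idx == 0 or idx == len(brackets)-1:
--             pass
--         elif bracket == '(':
--             result.append(')')
--         elif bracket == ')':
--             result.append('(')
--     return ''.join(result)
--
-- def chk_right(brackets):
--     stack = []
--     for bracket in brackets:
--         if bracket == '(':
--             stack.append(bracket)
--         elif len(stack) > 0 and stack[-1] == '(':
--             stack.pop()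
--         else:
--             return False
--     return True
--
-- def devide(brackets):
--     ocnt, ccnt = 0, 0
--     for idx, bracket in enumerate(brackets):
--         if bracket == '(':
--             ocnt += 1
--         elif bracket == ')':
--             ccnt += 1
--
--         if ocnt == ccnt:
--             u = brackets[:idx+1]
--             v = brackets[idx+1:]
--             return u, v
--
-- def solution(p):
--     if p == '':
--         return p
--
--     u, v = devide(p)
--     if chk_right(u):
--         v = solution(v)
--         return u + v
--     else:
--         v = solution(v)
--         u = algorithm_u(u)
--         return '(' + v + ')' + u
-- ===== SOURCE B (Python) =====
-- def solution(p):
--     # iterative single-pass version: segment balanced blocks with a counter,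
--     # fuse the correctness check into the same scan, and collect the nested
--     # suffixes on an explicit pending stack instead of recursing.
--     s = p
--     n = len(s)
--     prefix = []
--     pending = []
--     i = 0
--     while i < n:
--         bal = 0
--         d = 0
--         ok = True
--         j = i
--         while True:
--             c = s[j]
--             if c == '(':
--                 bal += 1
--                 d += 1
--             else:
--                 if c == ')':
--                     bal -= 1
--                 if d == 0:
--                     ok = False
--                 else:
--                     d -= 1
--             j += 1
--             if bal == 0:
--                 break
--         u = s[i:j]
--         if ok:
--             prefix.append(u)
--         else:
--             prefix.append('(')
--             mid = u[1:-1]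
--             pending.append(')' + ''.join('(' if c == ')' else ')' for c in mid if c in '()'))
--         i = j
--     return ''.join(prefix) + ''.join(reversed(pending))
-- ===== Notes on version B (the rewrite author's own statement) =====
-- stated objective: faster
-- what changed: Replaces A's recursion with repeated slicing and three separate per-block scans (devide, chk_right, algorithm_u) by a single left-to-right iterative scan that segments each balanced block once with a counter, fuses the correctness check into the same pass, and collects the nested ')'+flip(u) suffixes on an explicit pending stack joined once at the end.
-- outside the precondition, e.g. on solution('('): A raises TypeError, B raises IndexError; on solution(')'): A raises TypeError, B raises IndexError
import Mathlib
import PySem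

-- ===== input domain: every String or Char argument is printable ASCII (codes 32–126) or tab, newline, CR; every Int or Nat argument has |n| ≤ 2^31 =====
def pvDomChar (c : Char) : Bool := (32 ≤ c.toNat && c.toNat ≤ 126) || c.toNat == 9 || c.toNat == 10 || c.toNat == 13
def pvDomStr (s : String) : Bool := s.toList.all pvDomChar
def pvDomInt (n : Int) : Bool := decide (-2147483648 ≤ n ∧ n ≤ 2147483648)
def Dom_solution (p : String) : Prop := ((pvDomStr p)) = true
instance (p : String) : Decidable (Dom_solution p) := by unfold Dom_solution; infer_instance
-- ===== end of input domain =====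

-- B replaces A's recursion + three per-block rescans by one iterative balance scan with an
-- explicit pending-suffix stack (objective: faster, asymptotic O(n) vs O(n^2)).

-- ===== PORT A =====
-- devide: find the first index where ocnt == ccnt; u = p[:idx+1], v = p[idx+1:]; none = fall off loop (Python returns None, caller raises)
def devideGo (cs : List Char) : List Char → Nat → Int → Int → Option (List Char × List Char)
  | [], _, _, _ => none
  | c :: rest, idx, oc, cc =>
    let oc' : Int := if c = '(' then oc + 1 else oc
    let cc' : Int := if c = '(' then cc else if c = ')' then cc + 1 else cc
    if oc' = cc' then some (cs.take (idx + 1), cs.drop (idx + 1))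
    else devideGo cs rest (idx + 1) oc' cc'

def devideA (cs : List Char) : Option (List Char × List Char) := devideGo cs cs 0 0 0

-- chk_right: stack of '(' characters
def chkRightGo : List Char → List Char → Bool
  | _, [] => true
  | stack, c :: rest =>
    if c = '(' then chkRightGo ('(' :: stack) rest
    else if stack.length > 0 && stack.headD ' ' = '(' then chkRightGo stack.tail rest
    else false

-- algorithm_u: skip first and last index, flip brackets, drop other characters
def algUGo (n : Nat) : Nat → List Char → List Char
  | _, [] => []
  | idx, c :: rest =>
    if idx = 0 ∨ idx = n - 1 then algUGo n (idx + 1) rest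
    else if c = '(' then ')' :: algUGo n (idx + 1) rest
    else if c = ')' then '(' :: algUGo n (idx + 1) rest
    else algUGo n (idx + 1) rest

def algU (cs : List Char) : List Char := algUGo cs.length 0 cs

-- fuel bounds the recursion depth (each step strictly shortens the string); `none` from
-- devideA is where the Python raises (excluded by Pre_), we return [] there.
def solGoA : Nat → List Char → List Char
  | 0, _ => []
  | fuel + 1, cs =>
    if cs = [] then []
    else
      match devideA cs with
      | none => []
      | some (u, v) =>
        if chkRightGo [] u then u ++ solGoA fuel v
        else '(' :: (solGoA fuel v ++ ')' :: algU u)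

def solution (p : String) : String := String.mk (solGoA (p.toList.length + 1) p.toList)

-- ===== PORT B =====
-- inner while loop of Source B: consume chars until the bracket balance hits 0, tracking the
-- correctness counter d and the ok flag in the same pass; none = run off the end
-- (Python IndexError, excluded by Pre_).
def scanGoB : List Char → Int → Int → Bool → Option (List Char × List Char × Bool)
  | [], _, _, _ => none
  | c :: rest, bal, d, ok =>
    let bal' : Int := if c = '(' then bal + 1 else if c = ')' then bal - 1 else bal
    let d' : Int := if c = '(' then d + 1 else if d = 0 then d else d - 1
    let ok' : Bool := if c = '(' then ok else (ok && !(d = 0))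
    if bal' = 0 then some ([c], rest, ok')
    else (scanGoB rest bal' d' ok').map (fun r => (c :: r.1, r.2.1, r.2.2))

-- the comprehension ''.join('(' if c==')' else ')' for c in u[1:-1] if c in '()')
def flipMid (u : List Char) : List Char :=
  ((u.drop 1).dropLast).filterMap (fun c => if c = '(' then some ')' else if c = ')' then some '(' else none)

-- outer while loop of Source B: prefix parts and pending suffixes (joined reversed at the end)
def solGoB : Nat → List Char → List (List Char) → List (List Char) → List Char
  | 0, _, _, _ => []
  | fuel + 1, cs, pre, pen =>
    match cs with
    | [] => pre.flatten ++ pen.reverse.flatten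
    | _ :: _ =>
      match scanGoB cs 0 0 true with
      | none => []
      | some (u, rest, ok) =>
        if ok then solGoB fuel rest (pre ++ [u]) pen
        else solGoB fuel rest (pre ++ [['(']]) (pen ++ [')' :: flipMid u])

def solution_alt (p : String) : String := String.mk (solGoB (p.toList.length + 1) p.toList [] [])

-- ===== PRECONDITION & SPEC =====
-- Pre_ excludes exactly the inputs on which the Python A raises: whenever the '(' and ')'
-- counts differ, some recursive call reaches a string with no balanced prefix, devide
-- returns None and `u, v = devide(p)` raises TypeError (B raises IndexError there too).
def Pre_solution (p : String) : Prop := p.toList.count '(' = p.toList.count ')'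
instance (p : String) : Decidable (Pre_solution p) := by unfold Pre_solution; infer_instance
def pvWitness_solution : String := "(()))("

def Spec_solution (p : String) (out : String) : Prop := out = solution_alt p
instance (p : String) (out : String) : Decidable (Spec_solution p out) := by unfold Spec_solution; infer_instance

-- ===== CLAIM (what is proved, stated in full; the proofs are below) =====
def Claim_equal_solution : Prop := ∀ (p : String), Dom_solution p → Pre_solution p → Spec_solution p (solution p)

-- ===== LEMMAS AND PROOFS =====

-- bracket weight of a character and balance of a list
def pvW (c : Char) : Int := if c = '(' then 1 else if c = ')' then -1 else 0
def pvBal (cs : List Char) : Int := (cs.count '(' : Int) - (cs.count ')' : Int)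

-- reference splitter: first prefix where (bal + running bracket balance) hits 0
def findSplit : List Char → Int → Option (List Char × List Char)
  | [], _ => none
  | c :: rest, bal =>
    let b := bal + pvW c
    if b = 0 then some ([c], rest)
    else (findSplit rest b).map (fun r => (c :: r.1, r.2))

-- immediate-failure version of the ok flag / chk_right
def okRun : List Char → Int → Bool
  | [], _ => true
  | c :: rest, d =>
    if c = '(' then okRun rest (d + 1)
    else if d = 0 then false else okRun rest (d - 1)

theorem pvBal_cons (c : Char) (cs : List Char) : pvBal (c :: cs) = pvW c + pvBal cs := by
  simp only [pvBal, pvW, List.count_cons]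
  by_cases h1 : c = '(' <;> by_cases h2 : c = ')' <;> simp [h1, h2] <;> omega

theorem devideGo_eq_findSplit (rem : List Char) :
    ∀ (cs : List Char) (idx : Nat) (oc cc : Int), cs.drop idx = rem →
      oc - cc = -pvBal rem + pvBal cs →
      devideGo cs rem idx oc cc =
        (findSplit rem (oc - cc)).map (fun r => (cs.take idx ++ r.1, r.2)) := by
  induction rem with
  | nil => intro cs idx oc cc _ _; simp [devideGo, findSplit]
  | cons c rest ih =>
    intro cs idx oc cc hdrop hbal
    have hlt : idx < cs.length := by
      by_contra h
      simp [List.drop_eq_nil_of_le (Nat.le_of_not_lt h)] at hdrop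
    have hget : cs[idx] = c := by
      have h0 : (cs.drop idx)[0]'(by simp [hdrop]) = c := by simp [hdrop]
      simpa using h0
    have htake : cs.take (idx + 1) = cs.take idx ++ [c] := by
      rw [List.take_add_one, List.getElem?_eq_getElem hlt, hget]
      simp
    have hdrop' : cs.drop (idx + 1) = rest := by
      have h1 : cs.drop (idx + 1) = (cs.drop idx).drop 1 := by rw [List.drop_drop]
      simp [h1, hdrop]
    simp only [devideGo, findSplit]
    set oc' : Int := if c = '(' then oc + 1 else oc with hoc
    set cc' : Int := if c = '(' then cc else if c = ')' then cc + 1 else cc with hcc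
    have hW : oc' - cc' = oc - cc + pvW c := by
      rw [hoc, hcc]
      simp only [pvW]
      by_cases h1 : c = '(' <;> by_cases h2 : c = ')' <;> simp [h1, h2] <;> omega
    by_cases hz : oc' = cc'
    · have hz2 : oc - cc + pvW c = 0 := by omega
      simp [hz, hz2, htake, hdrop']
    · have hz2 : ¬ (oc - cc + pvW c = 0) := by omega
      rw [if_neg hz, if_neg hz2]
      have hbal' : oc' - cc' = -pvBal rest + pvBal cs := by
        rw [pvBal_cons] at hbal; omega
      rw [ih cs (idx + 1) oc' cc' hdrop' hbal', hW]
      cases findSplit rest (oc - cc + pvW c) with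
      | none => simp
      | some r => simp [htake]

theorem devideA_eq_findSplit (cs : List Char) : devideA cs = findSplit cs 0 := by
  have h := devideGo_eq_findSplit cs cs 0 0 0 (by simp) (by simp)
  have h0 : (0 : Int) - 0 = 0 := by norm_num
  rw [h0] at h
  rw [devideA, h]
  cases findSplit cs 0 with
  | none => simp
  | some r => simp

theorem scanGoB_eq_findSplit (rem : List Char) :
    ∀ (bal d : Int) (ok : Bool),
      scanGoB rem bal d ok =
        (findSplit rem bal).map (fun r => (r.1, r.2, ok && okRun r.1 d)) := by
  induction rem with
  | nil => intro bal d ok; simp [scanGoB, findSplit]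
  | cons c rest ih =>
    intro bal d ok
    simp only [scanGoB, findSplit]
    have hbal : (if c = '(' then bal + 1 else if c = ')' then bal - 1 else bal) = bal + pvW c := by
      simp only [pvW]; by_cases h1 : c = '(' <;> by_cases h2 : c = ')' <;> simp [h1, h2] <;> omega
    rw [hbal]
    by_cases hz : bal + pvW c = 0
    · simp only [if_pos hz, Option.map]
      refine congrArg some ?_
      refine Prod.ext rfl (Prod.ext rfl ?_)
      by_cases h1 : c = '(' <;> simp [h1, okRun] <;>
        by_cases h2 : (d : Int) = 0 <;> simp [h2, okRun]
    · rw [if_neg hz, if_neg hz]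
      rw [ih]
      cases hfs : findSplit rest (bal + pvW c) with
      | none => simp
      | some r =>
        simp only [Option.map_some]
        refine congrArg some ?_
        refine Prod.ext rfl (Prod.ext rfl ?_)
        by_cases h1 : c = '(' <;> simp [h1, okRun] <;>
          by_cases h2 : (d : Int) = 0 <;> simp [h2]

theorem okRun_eq_chkRight (u : List Char) :
    ∀ d : Nat, okRun u (d : Int) = chkRightGo (List.replicate d '(') u := by
  induction u with
  | nil => intro d; simp [okRun, chkRightGo]
  | cons c rest ih =>
    intro d
    by_cases h1 : c = '('
    · have : ('(' :: List.replicate d '(') = List.replicate (d + 1) '(' := by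
        simp [List.replicate_succ]
      simp only [okRun, chkRightGo, if_pos h1, this]
      have := ih (d + 1)
      push_cast at this ⊢
      exact this
    · cases d with
      | zero => simp [okRun, chkRightGo, h1]
      | succ k =>
        have hne : ((k : Int) + 1) ≠ 0 := by omega
        simp only [okRun, chkRightGo, if_neg h1]
        rw [if_neg (by push_cast; omega)]
        simp only [List.replicate_succ, List.length_cons, List.headD_cons, List.tail_cons]
        simp only [Nat.zero_lt_succ, decide_true, Bool.true_and]
        have := ih k
        rw [if_pos (by simp)]
        have hk : ((k + 1 : Nat) : Int) - 1 = (k : Int) := by omega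
        rw [hk, this]

-- algorithm_u equals the flipped middle: inner part (indices 1 .. n-2)
theorem algUGo_inner (rem : List Char) :
    ∀ (n idx : Nat), 1 ≤ idx → idx + rem.length = n →
      algUGo n idx rem = rem.dropLast.filterMap
        (fun c => if c = '(' then some ')' else if c = ')' then some '(' else none) := by
  induction rem with
  | nil => intro n idx _ _; simp [algUGo]
  | cons c rest ih =>
    intro n idx h1 hlen
    cases rest with
    | nil =>
      have : idx = n - 1 := by simp at hlen; omega
      simp [algUGo, this]
    | cons c2 r2 =>
      have hne : ¬ (idx = 0 ∨ idx = n - 1) := by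
        simp at hlen ⊢; omega
      have hrec := ih n (idx + 1) (by omega) (by simp at hlen ⊢; omega)
      have hstep : algUGo n idx (c :: c2 :: r2)
          = (if c = '(' then [')'] else if c = ')' then ['('] else []) ++ algUGo n (idx + 1) (c2 :: r2) := by
        simp only [algUGo, if_neg hne]
        by_cases hc1 : c = '('
        · simp [hc1]
        · by_cases hc2 : c = ')' <;> simp [hc1, hc2]
      rw [hstep, hrec,
        show (c :: c2 :: r2).dropLast = c :: (c2 :: r2).dropLast from
          List.dropLast_cons_of_ne_nil (by simp), List.filterMap_cons]
      by_cases hc1 : c = '('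
      · simp [hc1]
      · by_cases hc2 : c = ')' <;> simp [hc1, hc2]

theorem algU_eq_flipMid (u : List Char) : algU u = flipMid u := by
  cases u with
  | nil => simp [algU, algUGo, flipMid]
  | cons c rest =>
    cases rest with
    | nil => simp [algU, algUGo, flipMid]
    | cons c2 r2 =>
      simp only [algU, flipMid, List.drop_one, List.tail_cons]
      have h0 : (0 : Nat) = 0 ∨ (0 : Nat) = (c :: c2 :: r2).length - 1 := Or.inl rfl
      simp only [algUGo]
      exact algUGo_inner (c2 :: r2) (c :: c2 :: r2).length 1 (by omega) (by simp; omega)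

-- findSplit succeeds on a nonempty list whose total balance cancels the start value
theorem findSplit_succeeds (cs : List Char) :
    ∀ bal : Int, bal + pvBal cs = 0 → cs ≠ [] →
      ∃ u v, findSplit cs bal = some (u, v) ∧ cs = u ++ v ∧ u ≠ [] ∧ bal + pvBal u = 0 := by
  induction cs with
  | nil => intro _ _ h; exact absurd rfl h
  | cons c rest ih =>
    intro bal htot _
    rw [pvBal_cons] at htot
    simp only [findSplit]
    by_cases hz : bal + pvW c = 0
    · exact ⟨[c], rest, by simp [hz], by simp, by simp, by
        have : pvBal [c] = pvW c := by rw [pvBal_cons]; simp [pvBal]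
        omega⟩
    · have hrest : rest ≠ [] := by
        intro h; subst h; simp [pvBal] at htot; omega
      obtain ⟨u, v, hfs, happ, hune, hbu⟩ := ih (bal + pvW c) (by omega) hrest
      refine ⟨c :: u, v, ?_, by simp [happ], by simp, by rw [pvBal_cons]; omega⟩
      rw [if_neg hz, hfs]; rfl

theorem pvBal_append (u v : List Char) : pvBal (u ++ v) = pvBal u + pvBal v := by
  simp [pvBal, List.count_append]; push_cast; omega

-- main invariant: the iterative B-loop equals `accumulated prefix ++ A's result ++ pending`
theorem solGoB_eq (k : Nat) :
    ∀ (cs : List Char), cs.length ≤ k → pvBal cs = 0 →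
      ∀ (fuel : Nat) (pre pen : List (List Char)), cs.length + 1 ≤ fuel →
        solGoB fuel cs pre pen = pre.flatten ++ solGoA fuel cs ++ pen.reverse.flatten := by
  induction k with
  | zero =>
    intro cs hk _ fuel pre pen hfuel
    have : cs = [] := List.eq_nil_of_length_eq_zero (Nat.le_zero.mp hk)
    subst this
    cases fuel with
    | zero => omega
    | succ f => simp [solGoB, solGoA]
  | succ k ih =>
    intro cs hk hbal fuel pre pen hfuel
    cases fuel with
    | zero => omega
    | succ f =>
      cases hcs : cs with
      | nil => simp [solGoB, solGoA]
      | cons c rest =>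
        subst hcs
        obtain ⟨u, v, hfs, happ, hune, hbu⟩ :=
          findSplit_succeeds (c :: rest) 0 (by omega) (by simp)
        have hdev : devideA (c :: rest) = some (u, v) := by
          rw [devideA_eq_findSplit, hfs]
        have hscan : scanGoB (c :: rest) 0 0 true = some (u, v, chkRightGo [] u) := by
          rw [scanGoB_eq_findSplit, hfs]
          have hok : okRun u 0 = chkRightGo [] u := by
            have := okRun_eq_chkRight u 0
            simpa using this
          simp [hok]
        have hvlen : v.length < (c :: rest).length := by
          rw [happ]
          cases u with
          | nil => exact absurd rfl hune
          | cons _ _ => simp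
        have hbv : pvBal v = 0 := by
          have hx := pvBal_append u v
          rw [← happ] at hx; omega
        have hrec : ∀ pre' pen' : List (List Char),
            solGoB f v pre' pen' = pre'.flatten ++ solGoA f v ++ pen'.reverse.flatten := by
          intro pre' pen'
          exact ih v (by have := hvlen; simp at this ⊢; omega) hbv f pre' pen'
            (by have := hvlen; simp at this ⊢; omega)
        simp only [solGoB, solGoA, hdev, hscan]
        by_cases hchk : chkRightGo [] u = true
        · rw [if_pos hchk, if_pos hchk, hrec (pre ++ [u]) pen]
          simp
        · rw [if_neg hchk, if_neg hchk, hrec (pre ++ [['(']]) (pen ++ [')' :: flipMid u])]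
          simp [algU_eq_flipMid]

theorem pre_iff_bal (p : String) : Pre_solution p ↔ pvBal p.toList = 0 := by
  unfold Pre_solution pvBal
  omega

-- ===== VERDICT (by name: the statement is the Claim_ definition above) =====
theorem solution_spec : Claim_equal_solution := by
  intro p _ hpre
  unfold Spec_solution solution solution_alt
  rw [solGoB_eq p.toList.length p.toList le_rfl ((pre_iff_bal p).mp hpre)
      (p.toList.length + 1) [] [] le_rfl]
  simp
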